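-- pv_equiv track=rewrite | github.com/wilmurillo-ai/Design-Assistant | .skills/openclaw-skills/skills/sgillen/sf-civic-digest/scripts/sf_planning_notices.py | format_notices
-- ===== SOURCE A (Python) =====
-- def format_notices(notices, district=None):
--     if not notices:
--         label = f"District {district}" if district else "SF"
--         return f"No planning notices found for {label}."
--
--     lines = []
--     label = f"District {district}" if district else "all SF"
--     lines.append(f"🏗️  SF PLANNING NOTICES — {label}")
--     lines.append(f"   Source: sfplanning.org/notices")
--     lines.append("")
--
--     # Group by hearing body
--     by_body = {}
--     for n in notices:
--         body = n["hearing_body"] or "Other"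
--         by_body.setdefault(body, []).append(n)
--
--     order = [
--         "Planning Commission",
--         "Historic Preservation Commission",
--         "Zoning Administrator (Variance)",
--         "Section 311 Notice (no hearing)",
--         "Other",
--     ]
--
--     for body in order:
--         items = by_body.get(body, [])
--         if not items:
--             continue
--         lines.append(f"  {'─'*50}")
--         lines.append(f"  {body.upper()}")
--         lines.append("")
--         items.sort(key=lambda x: x.get("hearing_date") or x.get("expiration") or "")
--         for n in items:
--             hd = n.get("hearing_date", "")
--             date_label = f"Hearing: {hd}" if hd and hd != "N/A" else f"Expires: {n.get('expiration','')}"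
--             lines.append(f"  📍 {n['address']}")
--             lines.append(f"     Record: {n['record']}  |  {date_label}")
--             if n["neighborhood"]:
--                 lines.append(f"     Neighborhood: {n['neighborhood']}")
--             if n["contact_email"]:
--                 lines.append(f"     Contact: {n['contact_email']}")
--             lines.append("")
--
--     return "\n".join(lines)
-- ===== SOURCE B (Python) =====
-- ORDER = [
--     "Planning Commission",
--     "Historic Preservation Commission",
--     "Zoning Administrator (Variance)",
--     "Section 311 Notice (no hearing)",
--     "Other",
-- ]
--
--
-- def _loc(district, everywhere):
--     return f"District {district}" if district else everywhere
--
--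
-- def _key(n):
--     return n.get("hearing_date") or n.get("expiration") or ""
--
--
-- def _block(n):
--     hd = n.get("hearing_date", "")
--     when = f"Hearing: {hd}" if hd not in ("", "N/A") else f"Expires: {n.get('expiration', '')}"
--     extras = [f"     {label}: {val}"
--               for label, val in (("Neighborhood", n["neighborhood"]),
--                                  ("Contact", n["contact_email"]))
--               if val]
--     return [f"  📍 {n['address']}",
--             f"     Record: {n['record']}  |  {when}"] + extras + [""]
--
--
-- def _sections(order, notices):
--     if not order:
--         return []
--     body = order[0]
--     mine = sorted((n for n in notices if (n["hearing_body"] or "Other") == body), key=_key)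
--     rest = _sections(order[1:], notices)
--     if not mine:
--         return rest
--     return (["  " + "─" * 50, f"  {body.upper()}", ""]
--             + [ln for n in mine for ln in _block(n)]
--             + rest)
--
--
-- def format_notices(notices, district=None):
--     if not notices:
--         return f"No planning notices found for {_loc(district, 'SF')}."
--     return "\n".join(
--         [f"🏗️  SF PLANNING NOTICES — {_loc(district, 'all SF')}",
--          "   Source: sfplanning.org/notices", ""]
--         + _sections(ORDER, notices))
-- ===== Notes on version B (the rewrite author's own statement) =====
-- stated objective: alternative
-- what changed: B drops A's mutable by_body dict and imperative line-appending loop entirely: it recurses over the fixed ORDER list, filtering notices per body on the fly, and builds each notice block declaratively (a comprehension over labelled optional fields) instead of conditional appends.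
-- outside the precondition, e.g. on format_notices([{'hearing_body': 'Other'}], None): A raises KeyError, B raises KeyError
import Mathlib
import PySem

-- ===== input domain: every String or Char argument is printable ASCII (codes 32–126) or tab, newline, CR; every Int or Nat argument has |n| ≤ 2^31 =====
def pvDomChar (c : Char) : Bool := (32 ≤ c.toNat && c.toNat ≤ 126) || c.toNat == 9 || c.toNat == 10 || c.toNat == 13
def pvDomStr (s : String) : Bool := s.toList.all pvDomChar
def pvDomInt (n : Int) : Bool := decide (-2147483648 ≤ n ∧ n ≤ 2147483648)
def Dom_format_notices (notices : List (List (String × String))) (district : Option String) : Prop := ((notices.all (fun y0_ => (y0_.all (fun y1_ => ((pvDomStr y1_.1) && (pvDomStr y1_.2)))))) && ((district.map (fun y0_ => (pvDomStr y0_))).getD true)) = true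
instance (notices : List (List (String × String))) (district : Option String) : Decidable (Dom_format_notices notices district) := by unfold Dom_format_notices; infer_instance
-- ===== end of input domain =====

-- B replaces A's build-a-dict-then-traverse with a recursion over the fixed order list that filters notices per body and renders blocks declaratively (objective: alternative decomposition, same cost).


-- ===== PORT A =====
-- A's dict lookup on a notice: first match (the task's dict convention)
def pvGet? (n : List (String × String)) (k : String) : Option String :=
  (n.find? (fun p => p.1 == k)).map (·.2)

-- n.get(k, d)
def pvGetD (n : List (String × String)) (k d : String) : String :=
  (pvGet? n k).getD d

-- n["hearing_body"] or "Other"  (inside Pre_ the key is present; "" is the only falsy string)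
def pvNorm (n : List (String × String)) : String :=
  let b := pvGetD n "hearing_body" ""
  if b = "" then "Other" else b

-- sort key: x.get("hearing_date") or x.get("expiration") or ""
def pvKeyOf (n : List (String × String)) : String :=
  let h := pvGetD n "hearing_date" ""
  if h = "" then pvGetD n "expiration" "" else h

-- A's local `order` list
def pvOrderA : List String :=
  ["Planning Commission", "Historic Preservation Commission",
   "Zoning Administrator (Variance)", "Section 311 Notice (no hearing)", "Other"]

-- body of A's inner `for n in items` loop: the appends to `lines`, in order
def pvInnerA (acc : List String) (n : List (String × String)) : List String :=
  let hd := pvGetD n "hearing_date" ""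
  let dateLabel := if hd ≠ "" ∧ hd ≠ "N/A" then "Hearing: " ++ hd
                   else "Expires: " ++ pvGetD n "expiration" ""
  let acc := acc ++ ["  📍 " ++ pvGetD n "address" ""]
  let acc := acc ++ ["     Record: " ++ pvGetD n "record" "" ++ "  |  " ++ dateLabel]
  let acc := if pvGetD n "neighborhood" "" ≠ "" then
               acc ++ ["     Neighborhood: " ++ pvGetD n "neighborhood" ""] else acc
  let acc := if pvGetD n "contact_email" "" ≠ "" then
               acc ++ ["     Contact: " ++ pvGetD n "contact_email" ""] else acc
  acc ++ [""]

-- body of A's `for body in order` loop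
def pvStepA (byBody : PySem.Dict String (List (List (String × String))))
    (acc : List String) (body : String) : List String :=
  let items := byBody.getD body []
  if items.isEmpty then acc
  else
    let acc := acc ++ ["  " ++ String.ofList (List.replicate 50 '─'), "  " ++ PySem.Str.upper body, ""]
    let items := PySem.List.sorted items pvKeyOf false
    items.foldl pvInnerA acc

def format_notices (notices : List (List (String × String))) (district : Option String) : String :=
  if notices.isEmpty then
    let label := match district with
      | some d => if d = "" then "SF" else "District " ++ d
      | none => "SF"
    "No planning notices found for " ++ label ++ "."
  else
    let label := match district with
      | some d => if d = "" then "all SF" else "District " ++ d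
      | none => "all SF"
    let lines : List String :=
      ["🏗️  SF PLANNING NOTICES — " ++ label, "   Source: sfplanning.org/notices", ""]
    let byBody : PySem.Dict String (List (List (String × String))) :=
      notices.foldl (fun d n => d.modify (pvNorm n) [] (· ++ [n])) PySem.Dict.empty
    let lines := pvOrderA.foldl (pvStepA byBody) lines
    PySem.Str.join "\n" lines

-- ===== PORT B =====
-- _loc(district, everywhere)
def pvLoc (district : Option String) (everywhere : String) : String :=
  match district with
  | some d => if d ≠ "" then "District " ++ d else everywhere
  | none => everywhere

-- B's dict lookups go through PySem.Dict (a notice is its items list)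
def pvVal (n : List (String × String)) (k : String) : String :=
  (PySem.Dict.mk n).getD k ""

-- _key(n)
def pvKeyB (n : List (String × String)) : String :=
  let h := pvVal n "hearing_date"
  if h ≠ "" then h else pvVal n "expiration"

-- _block(n)
def pvBlock (n : List (String × String)) : List String :=
  let hd := pvVal n "hearing_date"
  let when := if ¬ (hd = "" ∨ hd = "N/A") then "Hearing: " ++ hd
              else "Expires: " ++ pvVal n "expiration"
  let extras :=
    (([("Neighborhood", pvVal n "neighborhood"),
       ("Contact", pvVal n "contact_email")]).filter (fun p => p.2 != "")).map
      (fun p => "     " ++ p.1 ++ ": " ++ p.2)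
  ["  📍 " ++ pvVal n "address",
   "     Record: " ++ pvVal n "record" ++ "  |  " ++ when] ++ extras ++ [""]

-- module-level ORDER
def pvORDER : List String :=
  ["Planning Commission", "Historic Preservation Commission",
   "Zoning Administrator (Variance)", "Section 311 Notice (no hearing)", "Other"]

-- _sections(order, notices): recursion on order
def pvSections : List String → List (List (String × String)) → List String
  | [], _ => []
  | body :: order', notices =>
    let mine := PySem.List.sorted
      (notices.filter (fun n =>
        (let b := pvVal n "hearing_body"; if b = "" then "Other" else b) == body))
      pvKeyB false
    let rest := pvSections order' notices
    if mine.isEmpty then rest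
    else ["  " ++ String.ofList (List.replicate 50 '─'), "  " ++ PySem.Str.upper body, ""]
         ++ mine.flatMap pvBlock ++ rest

def format_notices_alt (notices : List (List (String × String))) (district : Option String) : String :=
  if notices.isEmpty then
    "No planning notices found for " ++ pvLoc district "SF" ++ "."
  else
    PySem.Str.join "\n"
      (["🏗️  SF PLANNING NOTICES — " ++ pvLoc district "all SF",
        "   Source: sfplanning.org/notices", ""]
       ++ pvSections pvORDER notices)

-- ===== PRECONDITION & SPEC =====
-- Pre_ excludes exactly the inputs where A raises KeyError: a notice missing "hearing_body", or a notice
-- that gets rendered (its normalized body is in the fixed order list) missing one of the other four keys.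
def Pre_format_notices (notices : List (List (String × String))) (district : Option String) : Prop :=
  (notices.all (fun n =>
    n.any (fun p => p.1 == "hearing_body") &&
    (!(pvOrderA.contains (pvNorm n)) ||
      ["address", "record", "neighborhood", "contact_email"].all
        (fun k => n.any (fun p => p.1 == k))))) = true
instance (notices : List (List (String × String))) (district : Option String) : Decidable (Pre_format_notices notices district) := by unfold Pre_format_notices; infer_instance

def pvWitness_format_notices : (List (List (String × String))) × Option String :=
  ([[("hearing_body", "Other"), ("address", "1 Fake St"), ("record", "R1"),
     ("neighborhood", ""), ("contact_email", "")]], some "3")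

def Spec_format_notices (notices : List (List (String × String))) (district : Option String) (out : String) : Prop := out = format_notices_alt notices district
instance (notices : List (List (String × String))) (district : Option String) (out : String) : Decidable (Spec_format_notices notices district out) := by unfold Spec_format_notices; infer_instance

-- ===== CLAIM (what is proved, stated in full; the proofs are below) =====
def Claim_equal_format_notices : Prop := ∀ (notices : List (List (String × String))) (district : Option String), Dom_format_notices notices district → Pre_format_notices notices district → Spec_format_notices notices district (format_notices notices district)

-- ===== LEMMAS AND PROOFS =====

-- A's hand-written .get equals B's Dict lookup (both are first-match).
theorem pv_get_eq (n : List (String × String)) (k : String) :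
    pvGetD n k "" = pvVal n k := by
  rw [pvVal, PySem.Dict.getD_eq_get?_getD]
  induction n with
  | nil => rfl
  | cons p t ih =>
    rw [PySem.Dict.get?_mk_cons]
    by_cases h : p.1 = k
    · simp [pvGetD, pvGet?, h]
    · simpa [pvGetD, pvGet?, h, List.find?_cons, beq_iff_eq] using ih

-- the two sort keys agree
theorem pv_key_eq : pvKeyOf = pvKeyB := by
  funext n
  simp only [pvKeyOf, pvKeyB, ← pv_get_eq]
  by_cases h : pvGetD n "hearing_date" "" = "" <;> simp [h]

-- A's inner per-notice appends equal acc ++ pvBlock n.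
theorem pv_inner_step (acc : List String) (n : List (String × String)) :
    pvInnerA acc n = acc ++ pvBlock n := by
  simp only [pvInnerA, pvBlock, ← pv_get_eq, List.filter]
  cases hb3 : (pvGetD n "neighborhood" "" != "") <;>
  cases hb4 : (pvGetD n "contact_email" "" != "") <;>
  by_cases h1 : pvGetD n "hearing_date" "" = "" <;>
  by_cases h2 : pvGetD n "hearing_date" "" = "N/A" <;>
    simp_all [bne_iff_ne]

-- A's by_body dict, looked up at `body`, is exactly B's scan of notices for that body.
theorem pv_group_eq (notices : List (List (String × String))) (body : String) :
    (notices.foldl (fun d n => d.modify (pvNorm n) [] (· ++ [n])) PySem.Dict.empty).getD body []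
      = notices.filter (fun n =>
          (let b := pvVal n "hearing_body"; if b = "" then "Other" else b) == body) := by
  have h : notices.foldl (fun d n => d.modify (pvNorm n) [] (· ++ [n])) PySem.Dict.empty
      = (notices.map (fun n => (pvNorm n, n))).foldl
          (fun d p => d.modify p.1 [] (· ++ [p.2])) PySem.Dict.empty := by
    rw [List.foldl_map]
  rw [h, PySem.Dict.getD_foldl_modify_append, List.filter_map]
  simp [Function.comp_def, pvNorm, pv_get_eq]

-- A's per-body loop step is `acc ++` the body's chunk of B's pvSections.
theorem pv_stepA_eq (notices : List (List (String × String)))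
    (acc : List String) (body : String) :
    pvStepA (notices.foldl (fun d n => d.modify (pvNorm n) [] (· ++ [n])) PySem.Dict.empty)
        acc body
      = acc ++
        (let mine := PySem.List.sorted
            (notices.filter (fun n =>
              (let b := pvVal n "hearing_body"; if b = "" then "Other" else b) == body))
            pvKeyB false
         if mine.isEmpty then []
         else ["  " ++ String.ofList (List.replicate 50 '─'), "  " ++ PySem.Str.upper body, ""]
              ++ mine.flatMap pvBlock) := by
  simp only [pvStepA, pv_group_eq, pv_key_eq]
  by_cases hi : (notices.filter (fun n =>
      (let b := pvVal n "hearing_body"; if b = "" then "Other" else b) == body)) = []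
  · simp [hi, PySem.List.sorted_eq_nil_iff]
  · have h1 : (notices.filter (fun n =>
        (let b := pvVal n "hearing_body"; if b = "" then "Other" else b) == body)).isEmpty = false := by
      simp [hi]
    have h2 : (PySem.List.sorted (notices.filter (fun n =>
        (let b := pvVal n "hearing_body"; if b = "" then "Other" else b) == body))
        pvKeyB false).isEmpty = false := by
      simp [PySem.List.sorted_eq_nil_iff, hi]
    simp only [h1, h2, Bool.false_eq_true, if_false]
    rw [PySem.List.foldl_congr_mem' _ _ (fun acc n => acc ++ pvBlock n) _
          (by intro x _ a; exact pv_inner_step a x),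
        PySem.List.foldl_append_eq_flatMap]
    simp

-- A's whole per-body foldl is `init ++` B's recursive pvSections.
theorem pv_fold_eq_sections (notices : List (List (String × String)))
    (order : List String) (init : List String) :
    order.foldl
        (pvStepA (notices.foldl (fun d n => d.modify (pvNorm n) [] (· ++ [n])) PySem.Dict.empty))
        init
      = init ++ pvSections order notices := by
  induction order generalizing init with
  | nil => simp [pvSections]
  | cons body rest ih =>
    rw [List.foldl_cons, ih, pv_stepA_eq]
    simp only [pvSections]
    by_cases hi : (PySem.List.sorted
        (notices.filter (fun n =>
          (let b := pvVal n "hearing_body"; if b = "" then "Other" else b) == body))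
        pvKeyB false).isEmpty <;>
      simp [hi]

-- ===== VERDICT (by name: the statement is the Claim_ definition above) =====
theorem format_notices_spec : Claim_equal_format_notices := by
  intro notices district _ _
  unfold Spec_format_notices format_notices format_notices_alt
  by_cases hemp : notices.isEmpty
  · simp only [hemp, if_true]
    congr 1
    match district with
    | none => rfl
    | some d => by_cases h : d = "" <;> simp [pvLoc, h]
  · simp only [hemp, Bool.false_eq_true, if_false]
    rw [pv_fold_eq_sections]
    congr 2
    match district with
    | none => rfl
    | some d => by_cases h : d = "" <;> simp [pvLoc, h]
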